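-- pv_equiv track=rewrite | github.com/enjoy-the-learning/cs_study | os/coffeeisnak/test.py | check
-- ===== SOURCE A (Python) =====
-- def check(stones, p, k):
--     # p명이 지나갈 수 있는가?
--     after_walk = [stone - p for stone in stones]
--
--     cnt = 0
--     for num in after_walk:
--         if num <= 0:
--             cnt += 1
--
--             if cnt > k:
--                 return False
--         else:
--             cnt = 0
--
--     return True
-- ===== SOURCE B (Python) =====
-- def check(stones, p, k):
--     # Run-splitting: consume the stone sequence front-to-back, measuring each
--     # maximal run of submerged stones (stone <= p) as a unit; a run longer
--     # than k sinks the crossing.  The sequence is held as a reversed list so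
--     # each stone is consumed in O(1) with pop().
--     rest = stones[::-1]          # rest[-1] is the next stone front-to-back
--     while rest:
--         if rest[-1] > p:
--             rest.pop()
--             continue
--         run = 0
--         while rest and rest[-1] <= p:
--             run += 1
--             rest.pop()
--         if run > k:
--             return False
--     return True
-- ===== Notes on version B (the rewrite author's own statement) =====
-- stated objective: alternative
-- what changed: Replaces A's single pass with a running counter reset on dry stones by a run-splitting scan: the sequence is split into maximal runs of submerged stones (stone <= p), each run's length is measured as a unit and compared to k.
import Mathlib
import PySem

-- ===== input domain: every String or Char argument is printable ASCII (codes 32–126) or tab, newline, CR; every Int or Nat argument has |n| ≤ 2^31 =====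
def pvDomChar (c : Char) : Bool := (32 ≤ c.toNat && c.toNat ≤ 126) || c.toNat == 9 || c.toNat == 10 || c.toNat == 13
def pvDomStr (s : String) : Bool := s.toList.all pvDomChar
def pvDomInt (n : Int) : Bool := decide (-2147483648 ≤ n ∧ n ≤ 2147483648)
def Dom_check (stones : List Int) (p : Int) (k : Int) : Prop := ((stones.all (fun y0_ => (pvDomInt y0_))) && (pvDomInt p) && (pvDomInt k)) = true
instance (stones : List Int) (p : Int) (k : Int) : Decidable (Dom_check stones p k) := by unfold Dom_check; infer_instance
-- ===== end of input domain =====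

-- B replaces A's running counter-with-reset by splitting the sequence into maximal
-- submerged runs and testing each run's length; same values everywhere (objective: alternative).

-- ===== PORT A =====
-- A's for-loop over after_walk carrying the counter cnt.
def checkLoop (k : Int) : List Int → Int → Bool
  | [], _ => true
  | num :: rest, cnt =>
    if num ≤ 0 then
      let cnt' := cnt + 1
      if cnt' > k then false else checkLoop k rest cnt'
    else checkLoop k rest 0

def check (stones : List Int) (p : Int) (k : Int) : Bool :=
  let after_walk := stones.map (fun stone => stone - p)
  checkLoop k after_walk 0

-- ===== PORT B =====
-- B's inner while loop: consume the leading run of stones ≤ p, counting it;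
-- returns (run length, remaining stones).  (Python holds the remaining stones
-- as a reversed list popped from the end; the port holds them as a forward
-- list consumed at the head — same stones in the same order.)
def altRun (p : Int) : List Int → Int → Int × List Int
  | [], run => (run, [])
  | x :: xs, run => if x ≤ p then altRun p xs (run + 1) else (run, x :: xs)

theorem altRun_snd_len (p : Int) : ∀ (l : List Int) (c : Int), (altRun p l c).2.length ≤ l.length
  | [], _ => Nat.le_refl _
  | x :: xs, c => by
    simp only [altRun]
    split
    · exact Nat.le_succ_of_le (altRun_snd_len p xs (c + 1))
    · exact Nat.le_refl _

-- B's outer while loop.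
def altMain (p k : Int) : List Int → Bool
  | [] => true
  | x :: xs =>
    if x > p then altMain p k xs
    else
      let r := altRun p (x :: xs) 0
      if r.1 > k then false else altMain p k r.2
  termination_by l => l.length
  decreasing_by
    · simp
    · simp only [altRun, if_pos (by omega : x ≤ p)] at *
      exact Nat.lt_succ_of_le (altRun_snd_len p xs 1)

def check_alt (stones : List Int) (p : Int) (k : Int) : Bool := altMain p k stones

-- ===== PRECONDITION & SPEC =====
def Spec_check (stones : List Int) (p : Int) (k : Int) (out : Bool) : Prop := out = check_alt stones p k
instance (stones : List Int) (p : Int) (k : Int) (out : Bool) : Decidable (Spec_check stones p k out) := by unfold Spec_check; infer_instance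

-- ===== CLAIM (what is proved, stated in full; the proofs are below) =====
def Claim_equal_check : Prop := ∀ (stones : List Int) (p : Int) (k : Int), Dom_check stones p k → Spec_check stones p k (check stones p k)

-- ===== LEMMAS AND PROOFS =====

-- A's loop on stones directly (num = stone - p, and num ≤ 0 ↔ stone ≤ p).
def checkLoop' (p k : Int) : List Int → Int → Bool
  | [], _ => true
  | x :: rest, cnt =>
    if x ≤ p then
      if cnt + 1 > k then false else checkLoop' p k rest (cnt + 1)
    else checkLoop' p k rest 0

theorem checkLoop_map (p k : Int) : ∀ (l : List Int) (c : Int),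
    checkLoop k (l.map (fun s => s - p)) c = checkLoop' p k l c
  | [], _ => rfl
  | x :: xs, c => by
    simp only [List.map, checkLoop, checkLoop', sub_nonpos]
    split
    · split
      · rfl
      · exact checkLoop_map p k xs (c + 1)
    · exact checkLoop_map p k xs 0

theorem altRun_fst_ge (p : Int) : ∀ (l : List Int) (c : Int), c ≤ (altRun p l c).1
  | [], _ => le_refl _
  | x :: xs, c => by
    simp only [altRun]
    split
    · exact le_trans (by omega) (altRun_fst_ge p xs (c + 1))
    · exact le_refl _

-- Within a submerged run: A's counter continuation agrees with B's run test.
theorem run_agree (p k : Int) (m : Nat)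
    (ih : ∀ l : List Int, l.length ≤ m → checkLoop' p k l 0 = altMain p k l) :
    ∀ (l : List Int) (c : Int), l.length ≤ m → 1 ≤ c →
      (if c > k then false else checkLoop' p k l c)
        = (if (altRun p l c).1 > k then false else altMain p k (altRun p l c).2) := by
  intro l
  induction l with
  | nil =>
    intro c _ _
    by_cases h : c > k <;> simp [altRun, altMain, checkLoop', h]
  | cons y ys IH =>
    intro c hlen hc
    by_cases hck : c > k
    · have : (altRun p (y :: ys) c).1 > k := lt_of_lt_of_le hck (altRun_fst_ge p _ c)
      simp [hck, this]
    · simp only [if_neg hck]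
      by_cases hy : y ≤ p
      · have e : altRun p (y :: ys) c = altRun p ys (c + 1) := by
          simp [altRun, hy]
        rw [e]
        simp only [checkLoop', if_pos hy]
        exact IH (c + 1) (by simp at hlen; omega) (by omega)
      · have e : altRun p (y :: ys) c = (c, y :: ys) := by
          simp [altRun, hy]
        rw [e]
        simp only [if_neg hck]
        have hA : altMain p k (y :: ys) = altMain p k ys := by
          rw [altMain, if_pos (by omega : y > p)]
        rw [hA]
        simp only [checkLoop', if_neg hy]
        exact ih ys (by simp at hlen; omega)

theorem main_agree (p k : Int) : ∀ (n : Nat) (l : List Int), l.length ≤ n →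
    checkLoop' p k l 0 = altMain p k l := by
  intro n
  induction n with
  | zero =>
    intro l hl
    have : l = [] := List.eq_nil_of_length_eq_zero (Nat.le_zero.1 hl)
    subst this
    simp [checkLoop', altMain]
  | succ n ih =>
    intro l hl
    cases l with
    | nil => simp [checkLoop', altMain]
    | cons x xs =>
      by_cases hx : x ≤ p
      · have e : altRun p (x :: xs) 0 = altRun p xs 1 := by
          simp [altRun, hx]
        rw [altMain, if_neg (by omega : ¬ x > p)]
        simp only [e]
        rw [checkLoop', if_pos hx]
        have h := run_agree p k n ih xs 1 (by simp at hl; omega) le_rfl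
        simpa using h
      · rw [checkLoop', if_neg hx, altMain, if_pos (by omega : x > p)]
        exact ih xs (by simp at hl; omega)

-- ===== VERDICT (by name: the statement is the Claim_ definition above) =====
theorem check_spec : Claim_equal_check := by
  intro stones p k _
  unfold Spec_check check check_alt
  rw [checkLoop_map]
  exact main_agree p k stones.length stones (le_refl _)
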